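-- pv_equiv track=rewrite | github.com/cychenhaibin/HomeWork | 13.py | f
-- ===== SOURCE A (Python) =====
-- def isprime(n):  #判断素数函数
--     l=[]
--     for i in range(2,int(n/2)+1):
--         if n%i==0:
--             return False
--     return True
--
-- def f(n):        #找小于n的素数并求和
--     sum1=0
--     list1=[]
--     for i in range(3,n+1):
--         if isprime(i):
--             list1.append(i)
--
--     list2=list1[-1:-11:-1]
--     sum1=sum(list2)
--     return sum1
-- ===== SOURCE B (Python) =====
-- def f(n):
--     def is_prime(m):
--         d = 2
--         while d * d <= m:
--             if m % d == 0:
--                 return False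
--             d += 1
--         return True
--
--     total = 0
--     count = 0
--     m = n
--     while m >= 3 and count < 10:
--         if is_prime(m):
--             total += m
--             count += 1
--         m -= 1
--     return total
-- ===== Notes on version B (the rewrite author's own statement) =====
-- stated objective: faster
-- what changed: Instead of testing every integer in [3,n] by trial division up to m/2 and slicing the last 10 primes, B scans downward from n with a sqrt-bounded trial division and stops as soon as the 10 largest primes are found.
import Mathlib
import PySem

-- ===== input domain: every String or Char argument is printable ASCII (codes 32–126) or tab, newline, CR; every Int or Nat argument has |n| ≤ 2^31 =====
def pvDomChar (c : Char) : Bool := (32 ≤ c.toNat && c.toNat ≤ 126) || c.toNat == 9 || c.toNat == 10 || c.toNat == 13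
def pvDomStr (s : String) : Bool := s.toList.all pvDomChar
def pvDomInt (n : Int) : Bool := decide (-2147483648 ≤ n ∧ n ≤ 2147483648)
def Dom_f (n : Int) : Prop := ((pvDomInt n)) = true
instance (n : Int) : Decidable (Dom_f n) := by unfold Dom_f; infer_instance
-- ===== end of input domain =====

-- B scans DOWNWARD from n, collecting at most the 10 largest primes with sqrt-bounded trial
-- division and an early stop, instead of A's full upward scan with divisors up to m/2: faster.

-- ===== PORT A =====
-- A's isprime: trial division by every i in range(2, int(m/2)+1) (early return False = .all);
-- the dead list 'l' is omitted
def isprimeA (m : Int) : Bool :=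
  (PySem.List.pyRange 2 (PySem.Int.truncdiv m 2 + 1)).all (fun i => !(PySem.Int.mod m i == 0))

def f (n : Int) : Int :=
  let list1 := (PySem.List.pyRange 3 (n + 1)).foldl
    (fun acc i => if isprimeA i then acc ++ [i] else acc) []
  -- list1[-1:-11:-1]; the step -1 is nonzero, so slice? is never none and getD [] is never taken
  let list2 := (PySem.List.slice? list1 (some (-1)) (some (-11)) (-1)).getD []
  list2.sum

-- ===== PORT B =====
-- B's is_prime: while d*d <= m: if m % d == 0: return False; d += 1
def isPrimeSqrtAux (m d : Int) : Bool :=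
  if h : d * d ≤ m then
    if PySem.Int.mod m d == 0 then false else isPrimeSqrtAux m (d + 1)
  else true
termination_by (m + 1 - d).toNat
decreasing_by
  have hdd : d ≤ d * d := by
    rcases le_total d 0 with h0 | h0
    · nlinarith [mul_self_nonneg d]
    · rcases h0.lt_or_eq with h1 | h1
      · nlinarith
      · simp [← h1]
  have h2 : d ≤ m := hdd.trans h
  omega

def isPrimeSqrt (m : Int) : Bool := isPrimeSqrtAux m 2

-- B's main loop: while m >= 3 and count < 10: …; m -= 1
def loopB (m total count : Int) : Int :=
  if h : 3 ≤ m ∧ count < 10 then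
    if isPrimeSqrt m then loopB (m - 1) (total + m) (count + 1)
    else loopB (m - 1) total count
  else total
termination_by (m - 2).toNat
decreasing_by all_goals omega

def f_alt (n : Int) : Int := loopB n 0 0

-- ===== PRECONDITION & SPEC =====
def Spec_f (n : Int) (out : Int) : Prop := out = f_alt n
instance (n : Int) (out : Int) : Decidable (Spec_f n out) := by unfold Spec_f; infer_instance

-- ===== CLAIM (what is proved, stated in full; the proofs are below) =====
def Claim_equal_f : Prop := ∀ (n : Int), Dom_f n → Spec_f n (f n)

-- ===== LEMMAS AND PROOFS =====

lemma filterMap_range_rev (xs : List Int) (k : Nat) (hk : k ≤ xs.length) :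
    List.filterMap (fun x => xs[xs.length - 1 - x]?) (List.range k) = xs.reverse.take k := by
  induction k with
  | zero => simp
  | succ k ih =>
    rw [List.range_succ, List.filterMap_append, ih (by omega), List.take_add_one]
    have h1 : xs.length - 1 - k < xs.length := by omega
    have h2 : k < xs.reverse.length := by simp; omega
    simp [List.getElem?_eq_getElem h1, List.getElem?_eq_getElem h2, List.getElem_reverse]

-- xs[-1:-11:-1] is the last (up to) ten elements, back to front
lemma sliceRev10 (xs : List Int) :
    PySem.List.slice? xs (some (-1)) (some (-11)) (-1) = some (xs.reverse.take 10) := by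
  norm_num [PySem.List.slice?, PySem.List.sliceIndices]
  have hc : (if 1 + max (-11 + (xs.length:Int)) (-1) < (xs.length:Int) then
      (-1 + (xs.length:Int) - max (-11 + (xs.length:Int)) (-1)).toNat else 0) = min 10 xs.length := by
    split_ifs <;> omega
  rw [hc]
  rw [List.filterMap_congr (g := fun x => xs[xs.length - 1 - x]?) ?_]
  · rw [filterMap_range_rev xs _ (by omega)]
    rw [show xs.reverse.take (min 10 xs.length) = (xs.reverse.take xs.length).take 10 by
      rw [List.take_take, Nat.min_comm]]
    rw [show xs.reverse.take xs.length = xs.reverse by simp]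
  · intro x hx
    have hx' : x < min 10 xs.length := List.mem_range.mp hx
    have h : (-1 + (xs.length:Int) + -(x:Int)).toNat = xs.length - 1 - x := by omega
    simp only [h]

-- A's test says: no divisor i with 2 ≤ i and 2*i ≤ m
lemma isprimeA_iff (m : Int) (hm : 3 ≤ m) :
    isprimeA m = true ↔ ∀ i : Int, 2 ≤ i → 2 * i ≤ m → ¬ i ∣ m := by
  unfold isprimeA
  rw [List.all_eq_true]
  constructor
  · intro h i h2 h2i hdvd
    have hi : i ∈ PySem.List.pyRange 2 (PySem.Int.truncdiv m 2 + 1) := by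
      rw [PySem.List.mem_pyRange_one]
      constructor
      · exact h2
      · have : PySem.Int.truncdiv m 2 = m / 2 := Int.tdiv_eq_ediv_of_nonneg (by omega)
        rw [this]; omega
    have := h i hi
    simp [PySem.Int.mod_eq_zero_iff_dvd] at this
    exact this hdvd
  · intro h i hi
    rw [PySem.List.mem_pyRange_one] at hi
    have htd : PySem.Int.truncdiv m 2 = m / 2 := Int.tdiv_eq_ediv_of_nonneg (by omega)
    rw [htd] at hi
    have h2i : 2 * i ≤ m := by omega
    simp [PySem.Int.mod_eq_zero_iff_dvd]
    exact h i hi.1 h2i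

-- B's test says: no divisor e with d ≤ e and e*e ≤ m
lemma isPrimeSqrtAux_iff (m : Int) : ∀ (d : Int), 2 ≤ d →
    (isPrimeSqrtAux m d = true ↔ ∀ e : Int, d ≤ e → e * e ≤ m → ¬ e ∣ m) := by
  intro d
  induction d using isPrimeSqrtAux.induct m with
  | case1 d hdm hmod =>
    intro hd
    rw [isPrimeSqrtAux, dif_pos hdm, if_pos hmod]
    simp only [beq_iff_eq, PySem.Int.mod_eq_zero_iff_dvd] at hmod
    constructor
    · intro h; exact absurd h (by simp)
    · intro h; exact absurd hmod (h d le_rfl hdm)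
  | case2 d hdm hmod ih =>
    intro hd
    rw [isPrimeSqrtAux, dif_pos hdm, if_neg hmod]
    rw [ih (by omega)]
    simp only [beq_iff_eq, PySem.Int.mod_eq_zero_iff_dvd] at hmod
    constructor
    · intro h e he hem
      rcases eq_or_lt_of_le he with rfl | hlt
      · exact hmod
      · exact h e (by omega) hem
    · intro h e he hem
      exact h e (by omega) hem
  | case3 d hdm =>
    intro hd
    rw [isPrimeSqrtAux, dif_neg hdm]
    constructor
    · intro _ e he hem hdvd
      have : d * d ≤ e * e := by nlinarith
      omega
    · intro _; rfl

-- the two primality tests agree on every m ≥ 3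
lemma prime_eq (m : Int) (hm : 3 ≤ m) : isprimeA m = isPrimeSqrt m := by
  rw [Bool.eq_iff_iff, isprimeA_iff m hm]
  unfold isPrimeSqrt
  rw [isPrimeSqrtAux_iff m 2 le_rfl]
  constructor
  · intro h e h2 hem hdvd
    exact h e h2 (by nlinarith) hdvd
  · intro h i h2 h2i hdvd
    obtain ⟨c, hc⟩ := hdvd
    have hc2 : 2 ≤ c := by nlinarith
    by_cases hic : i ≤ c
    · exact h i h2 (by nlinarith) ⟨c, hc⟩
    · exact h c hc2 (by nlinarith) ⟨i, by rw [hc, mul_comm]⟩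

-- invariant of B's downward loop: it adds the next (10 - count) primes below m+1
lemma loopB_eq : ∀ (m total count : Int), 0 ≤ count → count ≤ 10 →
    loopB m total count =
      total + (((PySem.List.pyRange 3 (m + 1)).reverse.filter isPrimeSqrt).take
        (10 - count).toNat).sum := by
  intro m total count
  induction m, total, count using loopB.induct with
  | case1 m total count hg hp ih =>
    intro h0 h10
    rw [loopB, dif_pos hg, if_pos hp, ih (by omega) (by omega)]
    rw [show m - 1 + 1 = m by ring]
    rw [PySem.List.pyRange_one_succ_right (by omega : (3:Int) ≤ m), List.reverse_concat,
      List.filter_cons_of_pos hp]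
    rw [show (10 - count).toNat = (10 - (count + 1)).toNat + 1 by omega, List.take_succ_cons]
    rw [List.sum_cons]
    ring
  | case2 m total count hg hp ih =>
    intro h0 h10
    rw [loopB, dif_pos hg, if_neg hp, ih (by omega) (by omega)]
    rw [show m - 1 + 1 = m by ring]
    rw [PySem.List.pyRange_one_succ_right (by omega : (3:Int) ≤ m), List.reverse_concat,
      List.filter_cons_of_neg hp]
  | case3 m total count hg =>
    intro h0 h10
    rw [loopB, dif_neg hg]
    by_cases hm : 3 ≤ m
    · have hc : count = 10 := by omega
      simp [hc]
    · have : PySem.List.pyRange 3 (m + 1) = [] := by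
        apply List.eq_nil_iff_forall_not_mem.mpr
        intro x hx
        rw [PySem.List.mem_pyRange_one] at hx
        omega
      simp [this]

-- ===== VERDICT (by name: the statement is the Claim_ definition above) =====
theorem f_spec : Claim_equal_f := by
  intro n _
  unfold Spec_f f f_alt
  simp only [PySem.List.foldl_append_if_eq_filter, List.nil_append, sliceRev10, Option.getD_some]
  rw [loopB_eq n 0 0 (by omega) (by omega), List.filter_reverse]
  rw [List.filter_congr (fun i hi => by
    have h3 : 3 ≤ i := (PySem.List.mem_pyRange_one.mp hi).1
    exact prime_eq i h3)]
  rw [show ((10:Int) - 0).toNat = 10 by omega, zero_add]
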